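-- pv_equiv track=rewrite | github.com/offero/hackerrank | pickingcards.py | count_perms2
-- ===== SOURCE A (Python) =====
-- def count_perms2(vals):
--     vals = sorted(vals)
--     nvals = len(vals)
--     total = 1
--     i = j = 0
--     while i < nvals:
--         while j < nvals and vals[j] <= i:
--             j += 1
--
--         total = (total * (j-i)) % 1000000007
--         i += 1
--     return total
-- ===== SOURCE B (Python) =====
-- def count_perms2(vals):
--     # Histogram of values clamped to [0, n]; prefix sums
--     # give the number of values <= i, with no sort.
--     n = len(vals)
--     hist = {}
--     for v in vals:
--         k = 0 if v < 0 else (v if v < n else n)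
--         hist[k] = hist.get(k, 0) + 1
--     total = 1
--     c = 0
--     for i in range(n):
--         c += hist.get(i, 0)
--         total = total * (c - i) % 1000000007
--     return total
-- ===== Notes on version B (the rewrite author's own statement) =====
-- stated objective: alternative
-- what changed: Replaces sort + two-pointer sweep with a histogram of values clamped to [0,n] and a running prefix sum that yields the count of values <= i directly, without sorting.
import Mathlib
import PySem

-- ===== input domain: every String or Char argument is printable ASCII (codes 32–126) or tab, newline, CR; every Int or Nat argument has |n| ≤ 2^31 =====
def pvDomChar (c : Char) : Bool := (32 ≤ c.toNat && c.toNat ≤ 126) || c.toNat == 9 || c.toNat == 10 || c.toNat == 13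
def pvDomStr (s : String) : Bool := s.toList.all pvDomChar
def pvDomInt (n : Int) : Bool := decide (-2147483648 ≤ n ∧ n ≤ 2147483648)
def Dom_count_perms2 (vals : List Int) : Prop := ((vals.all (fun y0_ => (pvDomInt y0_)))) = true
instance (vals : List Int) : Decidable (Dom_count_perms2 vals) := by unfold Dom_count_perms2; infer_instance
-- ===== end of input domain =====

-- B replaces A's sort + two-pointer sweep by a histogram of values clamped
-- to [0,n] plus a prefix-sum pass (no sorting); same result, alternative algorithm.

-- ===== PORT A =====
-- inner while: 'while j < nvals and vals[j] <= i: j += 1'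
def pvInnerA (s : List Int) (n : Nat) (i : Int) (j : Nat) : Nat :=
  if h : j < n ∧ s.getD j 0 ≤ i then pvInnerA s n i (j + 1) else j
termination_by n - j
decreasing_by omega

-- outer while: 'while i < nvals: … total = (total * (j-i)) % 1000000007; i += 1'
def pvOuterA (s : List Int) (n i j : Nat) (total : Int) : Int :=
  if i < n then
    let j' := pvInnerA s n (i : Int) j
    pvOuterA s n (i + 1) j' (PySem.Int.mod (total * ((j' : Int) - (i : Int))) 1000000007)
  else total
termination_by n - i

def count_perms2 (vals : List Int) : Int :=
  let s := PySem.List.sorted vals (fun x => x) false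
  pvOuterA s s.length 0 0 1

-- ===== PORT B =====
-- 'k = 0 if v < 0 else (v if v < n else n)'
def pvClamp (n v : Int) : Int := if v < 0 then 0 else if v < n then v else n

def count_perms2_alt (vals : List Int) : Int :=
  let n : Int := vals.length
  let hist : PySem.Dict Int Int :=
    vals.foldl (fun d v => d.modify (pvClamp n v) 0 (· + 1)) PySem.Dict.empty
  ((PySem.List.pyRange 0 n 1).foldl
      (fun (p : Int × Int) i =>
        let c := p.1 + hist.getD i 0
        (c, PySem.Int.mod (p.2 * (c - i)) 1000000007))
      (0, 1)).2

-- ===== PRECONDITION & SPEC =====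
def Spec_count_perms2 (vals : List Int) (out : Int) : Prop := out = count_perms2_alt vals
instance (vals : List Int) (out : Int) : Decidable (Spec_count_perms2 vals out) := by unfold Spec_count_perms2; infer_instance

-- ===== CLAIM (what is proved, stated in full; the proofs are below) =====
def Claim_equal_count_perms2 : Prop := ∀ (vals : List Int), Dom_count_perms2 vals → Spec_count_perms2 vals (count_perms2 vals)

-- ===== LEMMAS AND PROOFS =====

-- number of elements ≤ i
def pvCnt (l : List Int) (i : Int) : Nat := l.countP (fun v => decide (v ≤ i))

-- common reference value: fold of (t * (cnt l k - k)) % M over k ∈ [a, n)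
def pvRef (l : List Int) (a n t : Int) : Int :=
  (PySem.List.pyRange a n 1).foldl
    (fun t k => PySem.Int.mod (t * ((pvCnt l k : Int) - k)) 1000000007) t

lemma pvCnt_le_length (l : List Int) (i : Int) : pvCnt l i ≤ l.length :=
  List.countP_le_length

lemma pvCnt_mono (l : List Int) {i j : Int} (h : i ≤ j) : pvCnt l i ≤ pvCnt l j := by
  apply List.countP_mono_left
  intro a _ ha
  simp_all; omega

-- characterisation of pvCnt on a sorted list
lemma pvCnt_char (s : List Int) (hs : s.Pairwise (· ≤ ·)) (i : Int) :
    ∀ j : Nat, j < s.length → (s.getD j 0 ≤ i ↔ j < pvCnt s i) := by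
  induction s with
  | nil => intro j hj; simp at hj
  | cons a t ih =>
    rcases List.pairwise_cons.mp hs with ⟨hall, ht⟩
    intro j hj
    cases j with
    | zero =>
      simp only [List.getD_cons_zero, pvCnt, List.countP_cons]
      by_cases hai : a ≤ i
      · simp [hai]
      · have h0 : t.countP (fun v => decide (v ≤ i)) = 0 := by
          apply List.countP_eq_zero.mpr
          intro b hb
          have := hall b hb
          simp; omega
        simp [hai, h0]
    | succ k =>
      simp only [pvCnt, List.countP_cons, List.getD]
      have hk : k < t.length := by simpa using hj
      by_cases hai : a ≤ i
      · have := ih ht k hk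
        simp only [pvCnt, List.getD] at this
        simp [hai, this]
      · have h0 : t.countP (fun v => decide (v ≤ i)) = 0 := by
          apply List.countP_eq_zero.mpr
          intro b hb
          have := hall b hb
          simp; omega
        have hmem : t.getD k 0 ∈ t := by
          rw [List.getD_eq_getElem t 0 hk]; exact List.getElem_mem hk
        have := hall _ hmem
        simp only [List.getD] at hmem this
        simp [hai, h0]; omega

lemma pvInnerA_eq (s : List Int) (hs : s.Pairwise (· ≤ ·)) (i : Int) :
    ∀ j : Nat, j ≤ pvCnt s i → pvInnerA s s.length i j = pvCnt s i := by
  intro j hj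
  induction hm : s.length - j using Nat.strong_induction_on generalizing j with
  | _ m ih =>
  rcases lt_or_eq_of_le hj with hlt | heq
  · have hjl : j < s.length := lt_of_lt_of_le hlt (pvCnt_le_length s i)
    have hle : s.getD j 0 ≤ i := (pvCnt_char s hs i j hjl).mpr hlt
    rw [pvInnerA]
    simp only [hjl, hle, and_self, dite_true]
    exact ih (s.length - (j + 1)) (by omega) (j + 1) hlt rfl
  · rw [pvInnerA]
    have : ¬ (j < s.length ∧ s.getD j 0 ≤ i) := by
      rintro ⟨h1, h2⟩
      have := (pvCnt_char s hs i j h1).mp h2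
      omega
    simp only [this, dite_false]
    exact heq

lemma pvOuterA_eq (s : List Int) (hs : s.Pairwise (· ≤ ·)) :
    ∀ (i j : Nat) (t : Int), j ≤ pvCnt s (i : Int) →
      pvOuterA s s.length i j t = pvRef s (i : Int) (s.length : Int) t := by
  intro i j t hj
  induction hm : s.length - i using Nat.strong_induction_on generalizing i j t with
  | _ m ih =>
  rw [pvOuterA]
  by_cases hi : i < s.length
  · simp only [hi, if_true]
    have hinner : pvInnerA s s.length (i : Int) j = pvCnt s (i : Int) :=
      pvInnerA_eq s hs (i : Int) j hj
    rw [hinner]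
    have hnext : pvCnt s (i : Int) ≤ pvCnt s ((i + 1 : Nat) : Int) := by
      apply pvCnt_mono; push_cast; omega
    rw [ih (s.length - (i + 1)) (by omega) (i + 1) _ _ hnext rfl]
    unfold pvRef
    have hcast : ((i : Int)) < (s.length : Int) := by exact_mod_cast hi
    conv_rhs => rw [PySem.List.pyRange_one_cons hcast]
    simp only [List.foldl_cons]
    push_cast
    rfl
  · simp only [hi, if_false]
    unfold pvRef
    rw [PySem.List.pyRange_one_eq_nil (by exact_mod_cast Nat.le_of_not_lt hi)]
    rfl

lemma countP_perm_ref (vals : List Int) (s : List Int) (hp : s.Perm vals) (a n t : Int) :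
    pvRef s a n t = pvRef vals a n t := by
  unfold pvRef
  have hc : ∀ k : Int, pvCnt s k = pvCnt vals k := fun k => hp.countP_eq _
  simp only [hc]

-- A equals the reference fold
lemma count_perms2_eq_ref (vals : List Int) :
    count_perms2 vals = pvRef vals 0 (vals.length : Int) 1 := by
  unfold count_perms2
  have hperm := PySem.List.sorted_perm vals (fun x => x) false
  have hpw := PySem.List.sorted_pairwise vals (fun x => x)
  have hlen : (PySem.List.sorted vals (fun x => x) false).length = vals.length :=
    hperm.length_eq
  rw [pvOuterA_eq _ hpw 0 0 1 (Nat.zero_le _)]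
  rw [countP_perm_ref vals _ hperm]
  rw [hlen]
  norm_num

-- ===== B side =====

-- the histogram lookup is the count of clamped values
lemma hist_getD_gen (n k : Int) :
    ∀ (vals : List Int) (d : PySem.Dict Int Int),
      (vals.foldl (fun d v => d.modify (pvClamp n v) 0 (· + 1)) d).getD k 0
        = d.getD k 0 + ((vals.map (pvClamp n)).count k : Int) := by
  intro vals
  induction vals with
  | nil => intro d; simp
  | cons a t ih =>
    intro d
    simp only [List.foldl_cons, List.map_cons]
    rw [ih, PySem.Dict.getD_modify, List.count_cons]
    simp only [beq_iff_eq]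
    by_cases h : k = pvClamp n a
    · rw [if_pos h, if_pos h.symm, h]
      push_cast; ring
    · rw [if_neg h, if_neg (fun e => h e.symm)]
      push_cast; ring

lemma hist_getD (vals : List Int) (n k : Int) :
    (vals.foldl (fun d v => d.modify (pvClamp n v) 0 (· + 1))
        (PySem.Dict.empty : PySem.Dict Int Int)).getD k 0
      = ((vals.map (pvClamp n)).count k : Int) := by
  rw [hist_getD_gen, PySem.Dict.getD_empty]
  simp

lemma count_map_eq_countP (vals : List Int) (f : Int → Int) (k : Int) :
    (vals.map f).count k = vals.countP (fun v => decide (f v = k)) := by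
  rw [List.count_eq_countP, List.countP_map]
  apply List.countP_congr
  intro v _
  simp only [Function.comp_apply, beq_iff_eq, decide_eq_true_eq]

lemma countP_split (vals : List Int) (f : Int → Int) (k : Int) :
    vals.countP (fun v => decide (f v < k)) + vals.countP (fun v => decide (f v = k))
      = vals.countP (fun v => decide (f v ≤ k)) := by
  induction vals with
  | nil => simp
  | cons a t ih =>
    simp only [List.countP_cons, decide_eq_true_eq]
    split_ifs <;> omega

-- clamped count agrees with the plain count for 0 ≤ k < n
lemma countP_clamp_eq (vals : List Int) (n k : Int) (h0 : 0 ≤ k) (hn : k < n) :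
    vals.countP (fun v => decide (pvClamp n v ≤ k)) = pvCnt vals k := by
  apply List.countP_congr
  intro v _
  unfold pvClamp
  split_ifs with h1 h2 <;> first | rfl | (simp only [decide_eq_true_eq]; omega)

lemma countP_clamp_lt_zero (vals : List Int) (n : Int) (hn : 0 ≤ n) :
    vals.countP (fun v => decide (pvClamp n v < 0)) = 0 := by
  apply List.countP_eq_zero.mpr
  intro v _
  unfold pvClamp
  split_ifs <;> simp only [decide_eq_true_eq] <;> omega

-- the prefix-sum fold of B equals the reference fold
lemma bfold_eq (vals : List Int) (n : Int) (hn : n = (vals.length : Int))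
    (hist : PySem.Dict Int Int)
    (hh : ∀ k : Int, hist.getD k 0 = ((vals.map (pvClamp n)).count k : Int)) :
    ∀ (a t : Int), 0 ≤ a →
      ((PySem.List.pyRange a n 1).foldl
          (fun (p : Int × Int) i =>
            let c := p.1 + hist.getD i 0
            (c, PySem.Int.mod (p.2 * (c - i)) 1000000007))
          ((vals.countP (fun v => decide (pvClamp n v < a)) : Int), t)).2
        = pvRef vals a n t := by
  intro a t ha
  induction hm : (n - a).toNat using Nat.strong_induction_on generalizing a t with
  | _ m ih =>
  by_cases hlt : a < n
  · rw [PySem.List.pyRange_one_cons hlt]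
    unfold pvRef
    rw [PySem.List.pyRange_one_cons hlt]
    simp only [List.foldl_cons]
    have hc : (vals.countP (fun v => decide (pvClamp n v < a)) : Int) + hist.getD a 0
        = (vals.countP (fun v => decide (pvClamp n v < a + 1)) : Int) := by
      rw [hh a, count_map_eq_countP]
      have hsplit := countP_split vals (pvClamp n) a
      have : vals.countP (fun v => decide (pvClamp n v ≤ a))
          = vals.countP (fun v => decide (pvClamp n v < a + 1)) := by
        apply List.countP_congr; intro v _; simp only [decide_eq_true_eq]; omega
      push_cast
      omega
    have hcnt : vals.countP (fun v => decide (pvClamp n v < a + 1)) = pvCnt vals a := by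
      have h1 : vals.countP (fun v => decide (pvClamp n v < a + 1))
          = vals.countP (fun v => decide (pvClamp n v ≤ a)) := by
        apply List.countP_congr; intro v _; simp only [decide_eq_true_eq]; omega
      rw [h1]
      exact countP_clamp_eq vals n a ha hlt
    show ((PySem.List.pyRange (a + 1) n 1).foldl _
        ((vals.countP (fun v => decide (pvClamp n v < a)) : Int) + hist.getD a 0,
          PySem.Int.mod (t * ((vals.countP (fun v => decide (pvClamp n v < a)) : Int) + hist.getD a 0 - a)) 1000000007)).2 = _
    rw [hc, hcnt]
    have h2 := ih (n - (a + 1)).toNat (by omega) (a + 1)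
      (PySem.Int.mod (t * ((pvCnt vals a : Int) - a)) 1000000007) (by omega) rfl
    rw [hcnt] at h2
    unfold pvRef at h2
    exact h2
  · rw [PySem.List.pyRange_one_eq_nil (by omega)]
    unfold pvRef
    rw [PySem.List.pyRange_one_eq_nil (by omega)]
    rfl

lemma count_perms2_alt_eq_ref (vals : List Int) :
    count_perms2_alt vals = pvRef vals 0 (vals.length : Int) 1 := by
  unfold count_perms2_alt
  simp only []
  have hh := hist_getD vals (vals.length : Int)
  have h0 : (0 : Int) = (vals.countP (fun v => decide (pvClamp (vals.length : Int) v < 0)) : Int) := by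
    rw [countP_clamp_lt_zero vals _ (by positivity)]; simp
  have hb := bfold_eq vals (vals.length : Int) rfl _ hh 0 1 le_rfl
  rw [← h0] at hb
  exact hb

-- ===== VERDICT (by name: the statement is the Claim_ definition above) =====
theorem count_perms2_spec : Claim_equal_count_perms2 := by
  intro vals _
  unfold Spec_count_perms2
  rw [count_perms2_eq_ref, count_perms2_alt_eq_ref]
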